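-- pv_equiv track=rewrite | github.com/montsedelarosa/IA_P2_10 | _08_Hamming.py | actualizar_neurona
-- ===== SOURCE A (Python) =====
-- def actualizar_neurona(neurona, patrones):
--     n = len(neurona)
--     for i in range(n):
--         suma = 0
--         for j in range(n):
--             suma += patrones[j] * neurona[j]
--         if suma >= 0:
--             neurona[i] = 1
--         else:
--             neurona[i] = -1
--     return neurona
-- ===== SOURCE B (Python) =====
-- def actualizar_neurona(neurona, patrones):
--     # Running dot product updated incrementally: O(n) instead of A's O(n^2).
--     # Mutates neurona in place, like A.
--     s = sum(p * x for p, x in zip(patrones, neurona))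
--     for i in range(len(neurona)):
--         old = neurona[i]
--         nuevo = 1 if s >= 0 else -1
--         s += patrones[i] * (nuevo - old)
--         neurona[i] = nuevo
--     return neurona
-- ===== Notes on version B (the rewrite author's own statement) =====
-- stated objective: faster
-- what changed: B computes the dot product once and then adjusts it incrementally by the single entry changed at each step, instead of recomputing the full dot product inside the loop.
import Mathlib
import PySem

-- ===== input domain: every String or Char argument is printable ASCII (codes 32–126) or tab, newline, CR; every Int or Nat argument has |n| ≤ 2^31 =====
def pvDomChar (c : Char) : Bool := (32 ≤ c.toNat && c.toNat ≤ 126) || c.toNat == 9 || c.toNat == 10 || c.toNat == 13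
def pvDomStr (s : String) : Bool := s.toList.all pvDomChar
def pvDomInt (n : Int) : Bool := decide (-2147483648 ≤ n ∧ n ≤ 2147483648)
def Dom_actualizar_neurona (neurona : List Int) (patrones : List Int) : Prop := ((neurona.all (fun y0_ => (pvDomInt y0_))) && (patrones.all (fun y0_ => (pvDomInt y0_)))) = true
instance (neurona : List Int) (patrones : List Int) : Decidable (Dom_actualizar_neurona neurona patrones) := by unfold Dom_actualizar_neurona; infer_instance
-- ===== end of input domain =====

-- B replaces A's per-step full dot-product recomputation by one initial dot product
-- maintained incrementally (O(n) vs O(n^2)); both mutate `neurona` in place in Python,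
-- the equivalence proved here is about the returned value.


-- shared indexing helper: xs[i] for a Nat loop index; exact wherever i is in range
-- (Pre_ below guarantees every access both ports make is in range)
def pg (xs : List Int) (i : Nat) : Int := (PySem.List.pyGet? xs (i : Int)).getD 0

-- ===== PORT A =====
def actualizar_neurona (neurona : List Int) (patrones : List Int) : List Int :=
  let n := neurona.length
  (List.range n).foldl (fun nr i =>
    let suma := (List.range n).foldl (fun s j => s + pg patrones j * pg nr j) 0
    nr.set i (if suma ≥ 0 then 1 else -1)) neurona

-- ===== PORT B =====
def actualizar_neurona_alt (neurona : List Int) (patrones : List Int) : List Int :=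
  let s0 := (patrones.zip neurona).foldl (fun s pq => s + pq.1 * pq.2) 0
  ((List.range neurona.length).foldl (fun (acc : Int × List Int) i =>
      let old := pg acc.2 i
      let nuevo : Int := if acc.1 ≥ 0 then 1 else -1
      (acc.1 + pg patrones i * (nuevo - old), acc.2.set i nuevo)) (s0, neurona)).2

-- ===== PRECONDITION & SPEC =====
-- A raises IndexError (patrones[j]) whenever patrones is shorter than neurona; Pre_ excludes exactly those inputs.
def Pre_actualizar_neurona (neurona : List Int) (patrones : List Int) : Prop :=
  neurona.length ≤ patrones.length
instance (neurona : List Int) (patrones : List Int) : Decidable (Pre_actualizar_neurona neurona patrones) := by unfold Pre_actualizar_neurona; infer_instance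

def pvWitness_actualizar_neurona : List Int × List Int := ([1, -1, 3], [2, -1, 0])

def Spec_actualizar_neurona (neurona : List Int) (patrones : List Int) (out : List Int) : Prop := out = actualizar_neurona_alt neurona patrones
instance (neurona : List Int) (patrones : List Int) (out : List Int) : Decidable (Spec_actualizar_neurona neurona patrones out) := by unfold Spec_actualizar_neurona; infer_instance

-- ===== CLAIM (what is proved, stated in full; the proofs are below) =====
def Claim_equal_actualizar_neurona : Prop := ∀ (neurona : List Int) (patrones : List Int), Dom_actualizar_neurona neurona patrones → Pre_actualizar_neurona neurona patrones → Spec_actualizar_neurona neurona patrones (actualizar_neurona neurona patrones)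

-- ===== LEMMAS AND PROOFS =====

-- the dot product both loops are about, as a Finset sum
def dotN (p q : List Int) (n : Nat) : Int := ∑ j ∈ Finset.range n, pg p j * pg q j

-- foldl-accumulated sum = Finset sum
theorem foldl_range_sum (f : Nat → Int) (n : Nat) (c : Int) :
    (List.range n).foldl (fun s j => s + f j) c = c + ∑ j ∈ Finset.range n, f j := by
  induction n generalizing c with
  | zero => simp
  | succ m ih => simp [List.range_succ, ih, Finset.sum_range_succ]; ring

-- pg after set
theorem pg_set (nr : List Int) (i j : Nat) (v : Int) (hi : i < nr.length) :
    pg (nr.set i v) j = if i = j then v else pg nr j := by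
  simp only [pg, PySem.List.pyGet?_natCast, List.getElem?_set]
  split_ifs with h
  · subst h; simp
  · rfl

-- how the dot product changes when one entry of q is set
theorem dotN_set (p nr : List Int) (n i : Nat) (v : Int) (hi : i < n) (hn : nr.length = n) :
    dotN p (nr.set i v) n = dotN p nr n + pg p i * (v - pg nr i) := by
  unfold dotN
  have : ∀ j ∈ Finset.range n,
      pg p j * pg (nr.set i v) j
        = pg p j * pg nr j + (if j = i then pg p i * (v - pg nr i) else 0) := by
    intro j _
    rw [pg_set nr i j v (by omega)]
    by_cases h : i = j
    · subst h; simp; ring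
    · have hji : ¬ j = i := fun hh => h hh.symm
      simp [h, hji]
  rw [Finset.sum_congr rfl this, Finset.sum_add_distrib,
    Finset.sum_ite_eq' (Finset.range n) i (fun _ => pg p i * (v - pg nr i))]
  simp [Finset.mem_range.mpr hi]

-- the initial zip fold of B equals the dot product, under Pre_
theorem zip_fold_eq_dotN (p q : List Int) (hp : q.length ≤ p.length) (c : Int) :
    (p.zip q).foldl (fun s pq => s + pq.1 * pq.2) c = c + dotN p q q.length := by
  induction q generalizing p c with
  | nil => simp [dotN]
  | cons x xs ih =>
    cases p with
    | nil => simp at hp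
    | cons y ys =>
      simp only [List.zip_cons_cons, List.foldl_cons]
      rw [ih ys (by simpa using hp)]
      unfold dotN
      simp only [List.length_cons]
      rw [Finset.sum_range_succ' (fun j => pg (y :: ys) j * pg (x :: xs) j)]
      have h1 : ∀ j : Nat, pg (y :: ys) (j + 1) = pg ys j := by
        intro j
        simp [pg, PySem.List.pyGet?_natCast]
      have h2 : ∀ j : Nat, pg (x :: xs) (j + 1) = pg xs j := by
        intro j
        simp [pg, PySem.List.pyGet?_natCast]
      simp only [h1, h2]
      have hy : pg (y :: ys) 0 = y := by simp [pg]
      have hx : pg (x :: xs) 0 = x := by simp [pg]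
      rw [hy, hx]
      ring

-- A's step, in closed (dotN) form
def stepA (p : List Int) (n : Nat) (nr : List Int) (i : Nat) : List Int :=
  nr.set i (if dotN p nr n ≥ 0 then 1 else -1)

theorem stepA_eq (p : List Int) (n : Nat) :
    (fun (nr : List Int) (i : Nat) =>
      nr.set i (if (List.range n).foldl (fun s j => s + pg p j * pg nr j) 0 ≥ 0 then 1 else -1))
      = stepA p n := by
  funext nr i
  rw [foldl_range_sum (fun j => pg p j * pg nr j) n 0, zero_add]
  rfl

-- main invariant: B's fold with a correct running sum tracks A's fold
theorem main_inv (p : List Int) (n : Nat) :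
    ∀ (l : List Nat), (∀ i ∈ l, i < n) → ∀ (nr : List Int), nr.length = n →
      l.foldl (fun (acc : Int × List Int) i =>
          (acc.1 + pg p i * ((if acc.1 ≥ 0 then (1:Int) else -1) - pg acc.2 i),
           acc.2.set i (if acc.1 ≥ 0 then (1:Int) else -1))) (dotN p nr n, nr)
        = (dotN p (l.foldl (stepA p n) nr) n, l.foldl (stepA p n) nr) := by
  intro l
  induction l with
  | nil => intro _ nr _; simp
  | cons i l ih =>
    intro hmem nr hn
    have hi : i < n := hmem i (by simp)
    simp only [List.foldl_cons]
    have hstep :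
        (dotN p nr n + pg p i * ((if dotN p nr n ≥ 0 then (1:Int) else -1) - pg nr i),
         nr.set i (if dotN p nr n ≥ 0 then (1:Int) else -1))
          = (dotN p (stepA p n nr i) n, stepA p n nr i) := by
      simp only [stepA]
      rw [dotN_set p nr n i _ hi hn]
    rw [hstep]
    exact ih (fun j hj => hmem j (by simp [hj])) (stepA p n nr i) (by simp [stepA, hn])

-- ===== VERDICT (by name: the statement is the Claim_ definition above) =====
theorem actualizar_neurona_spec : Claim_equal_actualizar_neurona := by
  intro neurona patrones _ hpre
  unfold Spec_actualizar_neurona actualizar_neurona actualizar_neurona_alt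
  dsimp only
  rw [stepA_eq patrones neurona.length,
    zip_fold_eq_dotN patrones neurona hpre 0, zero_add,
    main_inv patrones neurona.length (List.range neurona.length)
      (fun i hi => List.mem_range.mp hi) neurona rfl]
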